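-- pv_equiv track=rewrite | github.com/adnan2002/trad | appv5.py | standardize_symbol
-- ===== SOURCE A (Python) =====
-- def standardize_symbol(raw_symbol):
--     symbol_aliases = {
--     "BNB": ["BNB", "BNBUSDT", "Binance Coin"],
--     "ADA": ["ADA", "ADAUSDT", "Cardano"],
--     "SOL": ["SOL", "SOLUSDT", "Solana"],
--     "XRP": ["XRP", "XRPUSDT", "Ripple"],
--     "DOT": ["DOT", "DOTUSDT", "Polkadot"],
--     "DOGE": ["DOGE", "DOGEUSDT", "Dogecoin"],
--     "AVAX": ["AVAX", "AVAXUSDT", "Avalanche"],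
--     "SHIB": ["SHIB", "SHIBUSDT", "Shiba Inu"],
--     "MATIC": ["MATIC", "MATICUSDT", "Polygon"],
--     "LTC": ["LTC", "LTCUSDT", "Litecoin"],
--     "UNI": ["UNI", "UNIUSDT", "Uniswap"],
--     "BCH": ["BCH", "BCHUSDT", "Bitcoin Cash"],
--     "LINK": ["LINK", "LINKUSDT", "Chainlink"],
--     "TON": ["TON", "TONUSDT", "Toncoin"],
--     "TRX": ["TRX", "TRXUSDT", "TRON"],
--     "LEO": ["LEO", "LEOUSDT", "UNUS SED LEO"],
--     "DAI": ["DAI", "DAIUSDT", "Dai"],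
--     "NEAR": ["NEAR", "NEARUSDT", "NEAR Protocol"],
-- }
--
--     for key, aliases in symbol_aliases.items():
--         if raw_symbol.upper() in [alias.upper() for alias in aliases]:
--             return f"{key}USDT"  # Binance uses symbols without slashes, e.g., BNBUSDT
--     return None
-- ===== SOURCE B (Python) =====
-- _KEYS = {"BNB", "ADA", "SOL", "XRP", "DOT", "DOGE", "AVAX", "SHIB", "MATIC",
--          "LTC", "UNI", "BCH", "LINK", "TON", "TRX", "LEO", "DAI", "NEAR"}
--
-- _NAMES = {"BINANCE COIN": "BNB", "CARDANO": "ADA", "SOLANA": "SOL",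
--           "RIPPLE": "XRP", "POLKADOT": "DOT", "DOGECOIN": "DOGE",
--           "AVALANCHE": "AVAX", "SHIBA INU": "SHIB", "POLYGON": "MATIC",
--           "LITECOIN": "LTC", "UNISWAP": "UNI", "BITCOIN CASH": "BCH",
--           "CHAINLINK": "LINK", "TONCOIN": "TON", "TRON": "TRX",
--           "UNUS SED LEO": "LEO", "DAI": "DAI", "NEAR PROTOCOL": "NEAR"}
--
--
-- def standardize_symbol(raw_symbol):
--     u = raw_symbol.upper()
--     base = u[:-4] if u.endswith("USDT") else u
--     if base in _KEYS:
--         return base + "USDT"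
--     key = _NAMES.get(u)
--     return key + "USDT" if key is not None else None
-- ===== Notes on version B (the rewrite author's own statement) =====
-- stated objective: alternative
-- what changed: Instead of scanning the alias table and rebuilding uppercased alias lists per call, B uppercases the input, strips a trailing 'USDT' suffix and tests the base against a small set of 18 tickers, falling back to one dict lookup of full names.
import Mathlib
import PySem

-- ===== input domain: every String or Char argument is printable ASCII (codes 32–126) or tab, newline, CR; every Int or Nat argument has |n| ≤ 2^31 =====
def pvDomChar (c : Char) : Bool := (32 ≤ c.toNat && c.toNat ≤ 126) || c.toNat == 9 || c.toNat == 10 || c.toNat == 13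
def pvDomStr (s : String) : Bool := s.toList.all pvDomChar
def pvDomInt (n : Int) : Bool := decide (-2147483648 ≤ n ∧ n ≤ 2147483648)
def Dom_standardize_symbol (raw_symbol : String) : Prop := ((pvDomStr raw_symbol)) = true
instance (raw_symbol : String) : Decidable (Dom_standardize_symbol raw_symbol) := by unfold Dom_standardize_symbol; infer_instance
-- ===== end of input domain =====

-- B replaces A's per-call scan of the grouped alias table by uppercasing once, stripping a
-- trailing "USDT", testing the base against the 18 tickers, then one full-name dict lookup
-- (alternative decomposition; no speed claim).

-- ===== PORT A =====
-- the symbol_aliases dict of A, as an insertion-ordered association list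
def pvTableA : List (String × List String) := [("BNB", ["BNB", "BNBUSDT", "Binance Coin"]), ("ADA", ["ADA", "ADAUSDT", "Cardano"]), ("SOL", ["SOL", "SOLUSDT", "Solana"]), ("XRP", ["XRP", "XRPUSDT", "Ripple"]), ("DOT", ["DOT", "DOTUSDT", "Polkadot"]), ("DOGE", ["DOGE", "DOGEUSDT", "Dogecoin"]), ("AVAX", ["AVAX", "AVAXUSDT", "Avalanche"]), ("SHIB", ["SHIB", "SHIBUSDT", "Shiba Inu"]), ("MATIC", ["MATIC", "MATICUSDT", "Polygon"]), ("LTC", ["LTC", "LTCUSDT", "Litecoin"]), ("UNI", ["UNI", "UNIUSDT", "Uniswap"]), ("BCH", ["BCH", "BCHUSDT", "Bitcoin Cash"]), ("LINK", ["LINK", "LINKUSDT", "Chainlink"]), ("TON", ["TON", "TONUSDT", "Toncoin"]), ("TRX", ["TRX", "TRXUSDT", "TRON"]), ("LEO", ["LEO", "LEOUSDT", "UNUS SED LEO"]), ("DAI", ["DAI", "DAIUSDT", "Dai"]), ("NEAR", ["NEAR", "NEARUSDT", "NEAR Protocol"])]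

-- the 'for key, aliases in symbol_aliases.items(): if raw.upper() in [alias.upper() ...]: return key+"USDT"' loop
def pvLoopA : List (String × List String) → String → Option String
  | [], _ => none
  | (key, aliases) :: rest, raw =>
      if PySem.Str.upper raw ∈ aliases.map (fun a => PySem.Str.upper a) then some (key ++ "USDT")
      else pvLoopA rest raw

def standardize_symbol (raw_symbol : String) : Option String :=
  pvLoopA pvTableA raw_symbol

-- ===== PORT B =====
-- _KEYS = {...}  (a Python set of the 18 tickers)
def pvKeys : PySem.Set String := ["BNB", "ADA", "SOL", "XRP", "DOT", "DOGE", "AVAX", "SHIB", "MATIC", "LTC", "UNI", "BCH", "LINK", "TON", "TRX", "LEO", "DAI", "NEAR"]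

-- _NAMES = {uppercased full name -> ticker}
def pvNamesList : List (String × String) := [("BINANCE COIN", "BNB"), ("CARDANO", "ADA"), ("SOLANA", "SOL"), ("RIPPLE", "XRP"), ("POLKADOT", "DOT"), ("DOGECOIN", "DOGE"), ("AVALANCHE", "AVAX"), ("SHIBA INU", "SHIB"), ("POLYGON", "MATIC"), ("LITECOIN", "LTC"), ("UNISWAP", "UNI"), ("BITCOIN CASH", "BCH"), ("CHAINLINK", "LINK"), ("TONCOIN", "TON"), ("TRON", "TRX"), ("UNUS SED LEO", "LEO"), ("DAI", "DAI"), ("NEAR PROTOCOL", "NEAR")]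
def pvNames : PySem.Dict String String := PySem.Dict.mk pvNamesList

def standardize_symbol_alt (raw_symbol : String) : Option String :=
  let u := PySem.Str.upper raw_symbol
  let base := if PySem.Str.endswith u "USDT" then PySem.Str.slice u none (some (-4)) else u
  if PySem.Set.contains pvKeys base then some (base ++ "USDT")
  else
    match pvNames.get? u with
    | some key => some (key ++ "USDT")
    | none => none

-- ===== PRECONDITION & SPEC =====
def Spec_standardize_symbol (raw_symbol : String) (out : Option String) : Prop := out = standardize_symbol_alt raw_symbol
instance (raw_symbol : String) (out : Option String) : Decidable (Spec_standardize_symbol raw_symbol out) := by unfold Spec_standardize_symbol; infer_instance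

-- ===== CLAIM (what is proved, stated in full; the proofs are below) =====
def Claim_equal_standardize_symbol : Prop := ∀ (raw_symbol : String), Dom_standardize_symbol raw_symbol → Spec_standardize_symbol raw_symbol (standardize_symbol raw_symbol)

-- ===== LEMMAS AND PROOFS =====

-- all 53 distinct uppercased aliases of A's table
def pvAliases : List String := ["BNB", "BNBUSDT", "BINANCE COIN", "ADA", "ADAUSDT", "CARDANO", "SOL", "SOLUSDT", "SOLANA", "XRP", "XRPUSDT", "RIPPLE", "DOT", "DOTUSDT", "POLKADOT", "DOGE", "DOGEUSDT", "DOGECOIN", "AVAX", "AVAXUSDT", "AVALANCHE", "SHIB", "SHIBUSDT", "SHIBA INU", "MATIC", "MATICUSDT", "POLYGON", "LTC", "LTCUSDT", "LITECOIN", "UNI", "UNIUSDT", "UNISWAP", "BCH", "BCHUSDT", "BITCOIN CASH", "LINK", "LINKUSDT", "CHAINLINK", "TON", "TONUSDT", "TONCOIN", "TRX", "TRXUSDT", "TRON", "LEO", "LEOUSDT", "UNUS SED LEO", "DAI", "DAIUSDT", "NEAR", "NEARUSDT", "NEAR PROTOCOL"]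

-- first-match association lookup (proof helper)
def pvLookup : List (String × String) → String → Option String
  | [], _ => none
  | (k, w) :: rest, v => if v = k then some w else pvLookup rest v

theorem pvLookup_none (l : List (String × String)) (v : String)
    (h : ∀ kv ∈ l, v ≠ kv.1) : pvLookup l v = none := by
  induction l with
  | nil => rfl
  | cons kv l ih =>
      cases kv with
      | mk k w =>
          simp only [pvLookup, if_neg (h (k, w) (List.mem_cons_self ..))]
          exact ih (fun kv hkv => h kv (List.mem_cons_of_mem _ hkv))

-- first-match lookup is Dict.get? on the literal dict
theorem pvLookup_eq_get? (l : List (String × String)) (v : String) :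
    pvLookup l v = (PySem.Dict.mk l).get? v := by
  induction l with
  | nil => rfl
  | cons p l ih =>
      cases p with
      | mk k w =>
          rw [PySem.Dict.get?_mk_cons]
          by_cases h : v = k
          · simp [pvLookup, h]
          · simp [pvLookup, h, Ne.symm h, ih]

-- strings are equal iff their character lists are
theorem pvStr_ext (s t : String) (h : s.toList = t.toList) : s = t := by
  have := congrArg String.ofList h
  simpa using this

-- A's loop as a function of the already-uppercased input
def pvLoopAU : List (String × List String) → String → Option String
  | [], _ => none
  | (key, aliases) :: rest, u =>
      if u ∈ aliases.map (fun a => PySem.Str.upper a) then some (key ++ "USDT")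
      else pvLoopAU rest u

theorem pvLoopA_eq_U (t : List (String × List String)) (raw : String) :
    pvLoopA t raw = pvLoopAU t (PySem.Str.upper raw) := by
  induction t with
  | nil => rfl
  | cons kv t ih => cases kv with
      | mk k as => simp only [pvLoopA, pvLoopAU, ih]

-- B's body as a function of the already-uppercased input
def pvAltU (u : String) : Option String :=
  let base := if PySem.Str.endswith u "USDT" then PySem.Str.slice u none (some (-4)) else u
  if PySem.Set.contains pvKeys base then some (base ++ "USDT")
  else
    match pvNames.get? u with
    | some key => some (key ++ "USDT")
    | none => none

theorem pvAlt_eq_U (raw : String) : standardize_symbol_alt raw = pvAltU (PySem.Str.upper raw) := rfl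

theorem pvLoopAU_none (t : List (String × List String)) (u : String)
    (h : ∀ kv ∈ t, ∀ a ∈ kv.2, u ≠ PySem.Str.upper a) :
    pvLoopAU t u = none := by
  induction t with
  | nil => rfl
  | cons kv t ih =>
      cases kv with
      | mk k as =>
          have hm : u ∉ as.map (fun a => PySem.Str.upper a) := by
            intro hmem
            obtain ⟨a, ha, he⟩ := List.mem_map.mp hmem
            exact h (k, as) (List.mem_cons_self ..) a ha he.symm
          simp only [pvLoopAU, if_neg hm]
          exact ih (fun kv hkv a ha => h kv (List.mem_cons_of_mem _ hkv) a ha)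

-- every uppercased alias of the table is listed in pvAliases
theorem pvTable_aliases : pvTableA.all (fun kv => kv.2.all (fun a => PySem.Str.upper a ∈ pvAliases)) = true := by decide

-- the 53 alias cases, checked one by one
set_option maxRecDepth 4096 in
theorem pvAliases_agree : pvAliases.all (fun u => pvLoopAU pvTableA u == pvAltU u) = true := by decide

theorem pvKeys_sub : pvKeys.all (fun k => decide (k ∈ pvAliases)) = true := by decide
theorem pvKeysUSDT_sub : pvKeys.all (fun k => decide (k ++ "USDT" ∈ pvAliases)) = true := by decide
theorem pvNames_sub : pvNamesList.all (fun kv => decide (kv.1 ∈ pvAliases)) = true := by decide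

-- if u matches no alias, B's branches all miss
theorem pvAltU_none (u : String) (h : u ∉ pvAliases) : pvAltU u = none := by
  have hnames : pvNames.get? u = none := by
    rw [pvNames, ← pvLookup_eq_get?]
    refine pvLookup_none _ _ (fun kv hkv he => ?_)
    have := List.all_eq_true.mp pvNames_sub kv hkv
    exact h (he ▸ of_decide_eq_true this)
  by_cases hE : PySem.Str.endswith u "USDT" = true
  · -- u = p ++ "USDT"
    obtain ⟨p, hp⟩ : "USDT".toList <:+ u.toList := by
      simpa [PySem.Chars.endswith_iff] using hE
    have hbase : (PySem.Str.slice u none (some (-4))).toList = p := by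
      have h4 : PySem.List.slice u.toList none (some (-4 : Int)) = u.toList.take (u.toList.length - 4) := by
        have := PySem.List.slice_to_neg_ofNat u.toList 4 (by omega)
        simpa using this
      have hlen : u.toList.length - 4 = p.length := by
        rw [← hp]; simp
      simp only [PySem.Str.toList_slice, PySem.Chars.slice_eq_listSlice, h4, hlen]
      rw [← hp]
      simp
    have hcont : PySem.Set.contains pvKeys (PySem.Str.slice u none (some (-4))) = false := by
      by_contra hc
      have hc' : PySem.Str.slice u none (some (-4)) ∈ pvKeys := by
        simpa [PySem.Set.contains] using hc
      have hu : u = PySem.Str.slice u none (some (-4)) ++ "USDT" := by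
        apply pvStr_ext
        simp [hbase, ← hp]
      have := List.all_eq_true.mp pvKeysUSDT_sub _ hc'
      exact h (hu ▸ of_decide_eq_true this)
    have hEc : PySem.Chars.endswith u.toList ['U', 'S', 'D', 'T'] = true := by simpa using hE
    have hcont' : PySem.Str.slice u none (some (-4)) ∉ pvKeys := by
      simpa [PySem.Set.contains] using hcont
    simp [pvAltU, hEc, hnames, hcont']
  · have hE' : PySem.Str.endswith u "USDT" = false := by
      simpa using hE
    have hcont : PySem.Set.contains pvKeys u = false := by
      by_contra hc
      have hc' : u ∈ pvKeys := by
        simpa [PySem.Set.contains] using hc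
      exact h (of_decide_eq_true (List.all_eq_true.mp pvKeys_sub _ hc'))
    have hEc : PySem.Chars.endswith u.toList ['U', 'S', 'D', 'T'] = false := by simpa using hE'
    have hcont' : u ∉ pvKeys := by simpa [PySem.Set.contains] using hcont
    simp [pvAltU, hEc, hnames, hcont']

-- ===== VERDICT (by name: the statement is the Claim_ definition above) =====
theorem standardize_symbol_spec : Claim_equal_standardize_symbol := by
  intro raw _
  unfold Spec_standardize_symbol standardize_symbol
  rw [pvLoopA_eq_U, pvAlt_eq_U]
  by_cases h : PySem.Str.upper raw ∈ pvAliases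
  · exact eq_of_beq (List.all_eq_true.mp pvAliases_agree _ h)
  · rw [pvAltU_none _ h]
    refine pvLoopAU_none _ _ (fun kv hkv a ha he => ?_)
    have := of_decide_eq_true (List.all_eq_true.mp
      (List.all_eq_true.mp pvTable_aliases kv hkv) a ha)
    exact h (he ▸ this)
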